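-- pv_equiv track=rewrite | github.com/NullDev/Hacktoberfest-2020-FizzBuzz | Python/ElementaryMathFizzBuzz.py | checkThree
-- ===== SOURCE A (Python) =====
-- def checkThree(digits):
--     digitSum = 0
--     for i in digits:
--         digitSum = digitSum + i
--     if(digitSum > 9):
--         digitSumDigits = list(map(int, list(str(digitSum))))
--         return(checkThree(digitSumDigits))
--     else:
--         if(digitSum == 3 or digitSum == 6 or digitSum == 9):
--             return True
--         else:
--             return False
-- ===== SOURCE B (Python) =====
-- def checkThree(digits):
--     s = sum(digits)
--     return s > 0 and s % 3 == 0
-- ===== Notes on version B (the rewrite author's own statement) =====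
-- stated objective: simpler
-- what changed: Replaces the recursive digital-root computation (re-decomposing the sum through str/int round-trips) with a single sum and the closed-form divisibility test s > 0 and s % 3 == 0.
import Mathlib
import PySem

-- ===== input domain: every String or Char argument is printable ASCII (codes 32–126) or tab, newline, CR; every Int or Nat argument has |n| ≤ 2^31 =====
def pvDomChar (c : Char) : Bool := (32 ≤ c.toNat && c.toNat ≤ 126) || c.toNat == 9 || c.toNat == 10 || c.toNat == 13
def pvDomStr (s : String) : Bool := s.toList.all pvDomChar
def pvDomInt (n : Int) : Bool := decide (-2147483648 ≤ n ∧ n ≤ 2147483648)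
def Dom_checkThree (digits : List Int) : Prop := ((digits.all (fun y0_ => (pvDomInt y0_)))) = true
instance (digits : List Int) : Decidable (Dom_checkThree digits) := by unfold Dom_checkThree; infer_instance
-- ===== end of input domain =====

-- B replaces A's recursive digital-root computation with one sum and the closed-form
-- test 's > 0 and s % 3 == 0' (objective: simpler).

-- ===== PORT A =====
-- int(c) for a single-character string; the .getD 0 only totalizes the Option — in A the
-- characters always come from str() of an int > 9, where int(c) succeeds (exact there).
def pvDigitVal (c : Char) : Int := (PySem.Int.ofChars? [c]).getD 0

-- proof-side digit sum of a Nat, needed (with the lemmas below) for the port's termination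
def pvSdsum (n : Nat) : Nat :=
  if n < 10 then n else n % 10 + pvSdsum (n / 10)
decreasing_by exact Nat.div_lt_self (by omega) (by omega)

theorem pvDigitVal_digitChar : ∀ d, d < 10 → pvDigitVal (Nat.digitChar d) = (d : Int) := by decide

theorem pvCore_sum : ∀ fuel n acc, n < fuel →
    ((Nat.toDigitsCore 10 fuel n acc).map pvDigitVal).sum
      = (pvSdsum n : Int) + (acc.map pvDigitVal).sum := by
  intro fuel
  induction fuel with
  | zero => intro n acc h; omega
  | succ f ih =>
    intro n acc h
    rw [Nat.toDigitsCore]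
    by_cases h10 : n / 10 = 0
    · simp only [h10, if_pos, List.map_cons, List.sum_cons]
      rw [pvDigitVal_digitChar (n % 10) (by omega), pvSdsum]
      have : n < 10 := by omega
      simp [this]
      omega
    · rw [if_neg h10]
      rw [ih (n / 10) _ (by omega)]
      simp only [List.map_cons, List.sum_cons]
      rw [pvDigitVal_digitChar (n % 10) (by omega)]
      have hn : (pvSdsum n : Int) = (n % 10 : Nat) + (pvSdsum (n / 10) : Nat) := by
        rw [pvSdsum, if_neg (show ¬ n < 10 by omega)]; push_cast; ring
      rw [hn]; ring

theorem pvMapped_sum (n : Int) (h : 0 < n) :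
    ((PySem.Int.toChars n).map pvDigitVal).sum = (pvSdsum n.toNat : Int) := by
  unfold PySem.Int.toChars
  rw [if_neg (by omega)]
  unfold Nat.toDigits
  rw [pvCore_sum (n.toNat + 1) n.toNat [] (by omega)]
  simp

theorem pvSdsum_le : ∀ n, pvSdsum n ≤ n := by
  intro n
  fun_induction pvSdsum n with
  | case1 n h => omega
  | case2 n h ih => omega

theorem pvSdsum_lt (n : Nat) (h : 10 ≤ n) : pvSdsum n < n := by
  rw [pvSdsum, if_neg (by omega)]
  have := pvSdsum_le (n / 10)
  omega

-- port of A: sum by an explicit fold, then recurse on the digits of str(digitSum) when > 9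
def checkThree (digits : List Int) : Bool :=
  let digitSum := digits.foldl (· + ·) 0
  if h : 9 < digitSum then
    let digitSumDigits := (PySem.Int.toChars digitSum).map pvDigitVal
    checkThree digitSumDigits
  else
    if digitSum = 3 ∨ digitSum = 6 ∨ digitSum = 9 then true else false
termination_by (digits.foldl (· + ·) 0).toNat
decreasing_by
  have h' : (9:Int) < List.foldl (fun (x1 : Int) (x : {x : Int // x ∈ digits}) => x1 + x.1) 0
      digits.attach := h
  rw [List.foldl_attach] at h'
  have e2 : List.foldl (fun (x1 x2 : Int) => x1 + x2) 0 digits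
      = List.foldl (@HAdd.hAdd Int Int Int _) 0 digits := rfl
  simp only [List.foldl_attach]
  rw [← List.sum_eq_foldl, pvMapped_sum _ (by omega)]
  have := pvSdsum_lt (List.foldl (@HAdd.hAdd Int Int Int _) 0 digits).toNat (by omega)
  omega

-- ===== PORT B =====
def checkThree_alt (digits : List Int) : Bool :=
  let s := digits.sum
  decide (0 < s) && decide (PySem.Int.mod s 3 = 0)

-- ===== PRECONDITION & SPEC =====
def Spec_checkThree (digits : List Int) (out : Bool) : Prop := out = checkThree_alt digits
instance (digits : List Int) (out : Bool) : Decidable (Spec_checkThree digits out) := by unfold Spec_checkThree; infer_instance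

-- ===== CLAIM (what is proved, stated in full; the proofs are below) =====
def Claim_equal_checkThree : Prop := ∀ (digits : List Int), Dom_checkThree digits → Spec_checkThree digits (checkThree digits)

-- ===== LEMMAS AND PROOFS =====

theorem pvSdsum_mod3 : ∀ n, pvSdsum n % 3 = n % 3 := by
  intro n
  fun_induction pvSdsum n with
  | case1 n h => rfl
  | case2 n h ih => omega

theorem pvSdsum_pos : ∀ n, 0 < n → 0 < pvSdsum n := by
  intro n
  fun_induction pvSdsum n with
  | case1 n h => omega
  | case2 n h ih =>
    intro _
    have := ih (by omega)
    omega


theorem pvMain : ∀ (N : Nat) (digits : List Int),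
    (digits.foldl (· + ·) 0).toNat ≤ N → checkThree digits = checkThree_alt digits := by
  intro N
  induction N with
  | zero =>
    intro digits h
    unfold checkThree
    have hs : digits.foldl (· + ·) 0 ≤ 0 := by omega
    rw [dif_neg (by omega), if_neg (by omega)]
    unfold checkThree_alt
    rw [← List.sum_eq_foldl] at hs
    simp
    omega
  | succ n ih =>
    intro digits h
    unfold checkThree
    by_cases h9 : 9 < digits.foldl (· + ·) 0
    · rw [dif_pos h9]
      set s : Int := digits.foldl (· + ·) 0 with hsdef
      rw [ih _ (by
        rw [← List.sum_eq_foldl, pvMapped_sum _ (by omega)]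
        have := pvSdsum_lt s.toNat (by omega)
        omega)]
      unfold checkThree_alt
      rw [pvMapped_sum _ (by omega)]
      show (decide ((0:Int) < (pvSdsum s.toNat : Nat))
            && decide (PySem.Int.mod ((pvSdsum s.toNat : Nat) : Int) 3 = 0))
          = (decide (0 < digits.sum) && decide (PySem.Int.mod digits.sum 3 = 0))
      rw [List.sum_eq_foldl, ← hsdef]
      have hpos := pvSdsum_pos s.toNat (by omega)
      have hmod := pvSdsum_mod3 s.toNat
      have e1 : decide ((0:Int) < (pvSdsum s.toNat : Nat)) = decide (0 < s) := by
        simp only [decide_eq_decide]; omega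
      have e2 : decide (PySem.Int.mod ((pvSdsum s.toNat : Nat) : Int) 3 = 0)
              = decide (PySem.Int.mod s 3 = 0) := by
        rw [PySem.Int.mod_eq_emod_of_pos (by omega : (0:Int) < 3),
            PySem.Int.mod_eq_emod_of_pos (by omega : (0:Int) < 3)]
        simp only [decide_eq_decide]
        omega
      rw [e1, e2]
    · rw [dif_neg h9]
      unfold checkThree_alt
      rw [← List.sum_eq_foldl] at h9 ⊢
      set s : Int := digits.sum with hsdef
      show (if s = 3 ∨ s = 6 ∨ s = 9 then true else false)
          = (decide (0 < s) && decide (PySem.Int.mod s 3 = 0))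
      rw [PySem.Int.mod_eq_emod_of_pos (by omega : (0:Int) < 3)]
      by_cases hmem : s = 3 ∨ s = 6 ∨ s = 9
      · rw [if_pos hmem]
        have h1 : 0 < s := by omega
        have h2 : s % 3 = 0 := by omega
        simp [h1, h2]
      · rw [if_neg hmem]
        rcases Decidable.em (0 < s) with h1 | h1
        · have h2 : ¬ s % 3 = 0 := by omega
          simp [h2]
        · simp [h1]

-- ===== VERDICT (by name: the statement is the Claim_ definition above) =====
theorem checkThree_spec : Claim_equal_checkThree := by
  intro digits _
  unfold Spec_checkThree
  exact pvMain (digits.foldl (· + ·) 0).toNat digits le_rfl
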